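-- pv_equiv track=rewrite | github.com/Cedric-Roetheli/keywords | mpst_tag_analysis.py | detect_metric_column
-- ===== SOURCE A (Python) =====
-- from typing import Dict, Iterable, List, Optional, Sequence, Tuple
--
-- def detect_metric_column(columns: Sequence[str], preferred: str) -> str:
--     order_map = {
--         "vote_count": ["vote_count", "popularity", "revenue"],
--         "popularity": ["popularity", "vote_count", "revenue"],
--         "revenue": ["revenue", "vote_count", "popularity"],
--     }
--     for col in order_map.get(preferred, []):
--         if col in columns:
--             return col
--     raise ValueError(f"No suitable metric column found. Available: {columns}")
-- ===== SOURCE B (Python) =====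
-- def detect_metric_column(columns, preferred):
--     # Rank each metric (preferred gets rank 0), then take the minimum-rank
--     # column present, instead of scanning a candidate order against columns.
--     rank = {m: i + 1 for i, m in enumerate(["vote_count", "popularity", "revenue"])}
--     if preferred in rank:
--         rank[preferred] = 0
--         present = [c for c in columns if c in rank]
--         if present:
--             return min(present, key=rank.get)
--     raise ValueError(f"No suitable metric column found. Available: {columns}")
-- ===== Notes on version B (the rewrite author's own statement) =====
-- stated objective: alternative
-- what changed: Instead of scanning a hardcoded per-preferred candidate order against the columns, B assigns each metric a numeric rank (preferred gets 0), filters the columns to ranked ones, and returns the minimum-rank column.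
import Mathlib
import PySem

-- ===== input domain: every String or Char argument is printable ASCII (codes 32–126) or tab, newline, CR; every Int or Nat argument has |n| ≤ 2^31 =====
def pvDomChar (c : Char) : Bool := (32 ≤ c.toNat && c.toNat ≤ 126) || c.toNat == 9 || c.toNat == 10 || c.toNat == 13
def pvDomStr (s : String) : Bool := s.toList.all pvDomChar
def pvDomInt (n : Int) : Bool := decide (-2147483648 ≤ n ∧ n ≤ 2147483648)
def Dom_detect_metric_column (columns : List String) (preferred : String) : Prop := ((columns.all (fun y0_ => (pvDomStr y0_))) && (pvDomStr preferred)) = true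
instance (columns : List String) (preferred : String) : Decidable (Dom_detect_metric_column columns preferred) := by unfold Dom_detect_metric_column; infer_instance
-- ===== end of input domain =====

-- B replaces A's table of three hardcoded candidate orders by a rank dict and a
-- minimum-by-rank pass over the columns themselves (objective: alternative decomposition).
-- Return-value equivalence only; neither version mutates its arguments.

-- ===== PORT A =====
-- Python raise → PySem-style: the find? returns none exactly where A raises; ".getD \"\"" is only reached outside Pre_.
def detect_metric_column (columns : List String) (preferred : String) : String :=
  let order_map : PySem.Dict String (List String) :=
    (((PySem.Dict.empty).insert "vote_count" ["vote_count", "popularity", "revenue"]).insert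
        "popularity" ["popularity", "vote_count", "revenue"]).insert
      "revenue" ["revenue", "vote_count", "popularity"]
  ((order_map.getD preferred []).find? (fun col => columns.contains col)).getD ""

-- ===== PORT B =====
-- rank.get is only applied to keys present in rank (present is filtered by membership),
-- so PySem.Dict.getD with an unused default is exact here.
def detect_metric_column_alt (columns : List String) (preferred : String) : String :=
  let rank0 : PySem.Dict String Int :=
    (PySem.List.enumerate ["vote_count", "popularity", "revenue"] 0).foldl
      (fun d p => d.insert p.2 (p.1 + 1)) PySem.Dict.empty
  if rank0.contains preferred then
    let rank := rank0.insert preferred 0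
    let present := columns.filter (fun c => rank.contains c)
    match PySem.List.min? present (fun c => rank.getD c 0) with
    | some m => m
    | none => ""
  else ""

-- ===== PRECONDITION & SPEC =====
-- Pre_ excludes exactly the inputs where A raises ValueError (unknown preferred, or none of the three metric columns present).
def Pre_detect_metric_column (columns : List String) (preferred : String) : Prop :=
  (preferred = "vote_count" ∨ preferred = "popularity" ∨ preferred = "revenue") ∧
  ("vote_count" ∈ columns ∨ "popularity" ∈ columns ∨ "revenue" ∈ columns)
instance (columns : List String) (preferred : String) : Decidable (Pre_detect_metric_column columns preferred) := by unfold Pre_detect_metric_column; infer_instance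
def pvWitness_detect_metric_column : List String × String := (["title", "popularity"], "revenue")
def Spec_detect_metric_column (columns : List String) (preferred : String) (out : String) : Prop := out = detect_metric_column_alt columns preferred
instance (columns : List String) (preferred : String) (out : String) : Decidable (Spec_detect_metric_column columns preferred out) := by unfold Spec_detect_metric_column; infer_instance

-- ===== CLAIM (what is proved, stated in full; the proofs are below) =====
def Claim_equal_detect_metric_column : Prop := ∀ (columns : List String) (preferred : String), Dom_detect_metric_column columns preferred → Pre_detect_metric_column columns preferred → Spec_detect_metric_column columns preferred (detect_metric_column columns preferred)

-- ===== LEMMAS AND PROOFS =====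

-- The heart of the equivalence: a minimum-by-rank over the columns filtered to the
-- candidate set equals the first candidate (in strictly increasing rank order) present.
theorem min_filter_eq_find (c1 c2 c3 : String) (r : String → Int) (p : String → Bool)
    (hp : ∀ c, p c = (c == c1 || c == c2 || c == c3))
    (h12 : r c1 < r c2) (h23 : r c2 < r c3)
    (cols : List String) :
    PySem.List.min? (cols.filter p) r =
      List.find? (fun c => cols.contains c) [c1, c2, c3] := by
  have h13 : r c1 < r c3 := lt_trans h12 h23
  have hmem : ∀ c, c ∈ cols.filter p ↔ (c ∈ cols ∧ (c = c1 ∨ c = c2 ∨ c = c3)) := by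
    intro c
    simp [List.mem_filter, hp]
    tauto
  by_cases hc1 : c1 ∈ cols
  · -- first candidate present: both sides are c1
    have hin : c1 ∈ cols.filter p := (hmem c1).2 ⟨hc1, Or.inl rfl⟩
    have hne : cols.filter p ≠ [] := by intro h; rw [h] at hin; exact (List.not_mem_nil) hin
    obtain ⟨m, hm⟩ : ∃ m, PySem.List.min? (cols.filter p) r = some m := by
      cases h : PySem.List.min? (cols.filter p) r with
      | none => exact absurd ((PySem.List.min?_eq_none_iff _ _).mp h) hne
      | some m => exact ⟨m, rfl⟩
    have hmmem := PySem.List.min?_mem hm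
    have hmin := PySem.List.min?_isMin hm c1 hin
    have hm3 := ((hmem m).1 hmmem).2
    have hmc1 : m = c1 := by
      rcases hm3 with h | h | h
      · exact h
      · subst h; omega
      · subst h; omega
    rw [hm, hmc1]
    simp [List.find?, hc1]
  · by_cases hc2 : c2 ∈ cols
    · -- second candidate: both sides are c2
      have hin : c2 ∈ cols.filter p := (hmem c2).2 ⟨hc2, Or.inr (Or.inl rfl)⟩
      have hne : cols.filter p ≠ [] := by intro h; rw [h] at hin; exact (List.not_mem_nil) hin
      obtain ⟨m, hm⟩ : ∃ m, PySem.List.min? (cols.filter p) r = some m := by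
        cases h : PySem.List.min? (cols.filter p) r with
        | none => exact absurd ((PySem.List.min?_eq_none_iff _ _).mp h) hne
        | some m => exact ⟨m, rfl⟩
      have hmmem := PySem.List.min?_mem hm
      have hmin := PySem.List.min?_isMin hm c2 hin
      obtain ⟨hmc, hm3⟩ := (hmem m).1 hmmem
      have hmc2 : m = c2 := by
        rcases hm3 with h | h | h
        · exact absurd (h ▸ hmc) hc1
        · exact h
        · subst h; omega
      rw [hm, hmc2]
      simp [List.find?, hc1, hc2]
    · by_cases hc3 : c3 ∈ cols
      · -- third candidate: both sides are c3
        have hin : c3 ∈ cols.filter p := (hmem c3).2 ⟨hc3, Or.inr (Or.inr rfl)⟩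
        have hne : cols.filter p ≠ [] := by intro h; rw [h] at hin; exact (List.not_mem_nil) hin
        obtain ⟨m, hm⟩ : ∃ m, PySem.List.min? (cols.filter p) r = some m := by
          cases h : PySem.List.min? (cols.filter p) r with
          | none => exact absurd ((PySem.List.min?_eq_none_iff _ _).mp h) hne
          | some m => exact ⟨m, rfl⟩
        have hmmem := PySem.List.min?_mem hm
        obtain ⟨hmc, hm3⟩ := (hmem m).1 hmmem
        have hmc3 : m = c3 := by
          rcases hm3 with h | h | h
          · exact absurd (h ▸ hmc) hc1
          · exact absurd (h ▸ hmc) hc2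
          · exact h
        rw [hm, hmc3]
        simp [List.find?, hc1, hc2, hc3]
      · -- no candidate present: filter is empty, find? is none
        have hnil : cols.filter p = [] := by
          apply List.eq_nil_iff_forall_not_mem.mpr
          intro c hc
          obtain ⟨hcc, h3⟩ := (hmem c).1 hc
          rcases h3 with h | h | h <;> subst h
          · exact hc1 hcc
          · exact hc2 hcc
          · exact hc3 hcc
        rw [hnil]
        simp [PySem.List.min?, List.find?, hc1, hc2, hc3]

-- ===== VERDICT (by name: the statement is the Claim_ definition above) =====
theorem detect_metric_column_spec : Claim_equal_detect_metric_column := by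
  intro columns preferred _ hpre
  unfold Spec_detect_metric_column detect_metric_column detect_metric_column_alt
  obtain ⟨hp, _⟩ := hpre
  rcases hp with h | h | h <;> subst h <;>
    simp only [PySem.List.enumerate, List.foldl] <;>
    rw [if_pos (by decide)]
  · rw [min_filter_eq_find "vote_count" "popularity" "revenue" _ _
        (by intro c;
            rw [show ((((PySem.Dict.empty.insert "vote_count" ((0:Int) + 1)).insert "popularity" (0 + 1 + 1)).insert "revenue" (0 + 1 + 1 + 1)).insert "vote_count" 0) = PySem.Dict.mk [("vote_count",0),("popularity",2),("revenue",3)] from by decide];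
            simp only [PySem.Dict.contains_mk];
            rw [Bool.eq_iff_iff];
            simp [@eq_comm String];
            tauto)
        (by decide) (by decide) columns]
    show (List.find? (fun c => columns.contains c) ["vote_count", "popularity", "revenue"]).getD "" = _
    cases List.find? (fun c => columns.contains c) ["vote_count", "popularity", "revenue"] <;> rfl
  · rw [min_filter_eq_find "popularity" "vote_count" "revenue" _ _
        (by intro c;
            rw [show ((((PySem.Dict.empty.insert "vote_count" ((0:Int) + 1)).insert "popularity" (0 + 1 + 1)).insert "revenue" (0 + 1 + 1 + 1)).insert "popularity" 0) = PySem.Dict.mk [("vote_count",1),("popularity",0),("revenue",3)] from by decide];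
            simp only [PySem.Dict.contains_mk];
            rw [Bool.eq_iff_iff];
            simp [@eq_comm String];
            tauto)
        (by decide) (by decide) columns]
    show (List.find? (fun c => columns.contains c) ["popularity", "vote_count", "revenue"]).getD "" = _
    cases List.find? (fun c => columns.contains c) ["popularity", "vote_count", "revenue"] <;> rfl
  · rw [min_filter_eq_find "revenue" "vote_count" "popularity" _ _
        (by intro c;
            rw [show ((((PySem.Dict.empty.insert "vote_count" ((0:Int) + 1)).insert "popularity" (0 + 1 + 1)).insert "revenue" (0 + 1 + 1 + 1)).insert "revenue" 0) = PySem.Dict.mk [("vote_count",1),("popularity",2),("revenue",0)] from by decide];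
            simp only [PySem.Dict.contains_mk];
            rw [Bool.eq_iff_iff];
            simp [@eq_comm String];
            tauto)
        (by decide) (by decide) columns]
    show (List.find? (fun c => columns.contains c) ["revenue", "vote_count", "popularity"]).getD "" = _
    cases List.find? (fun c => columns.contains c) ["revenue", "vote_count", "popularity"] <;> rfl
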